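-- pv_equiv track=rewrite | github.com/aroomak/NLP_WDPS | WDPS-Entity recognition & Entity linking/Run_Gp33_Final.py | get_html_part
-- ===== SOURCE A (Python) =====
-- def get_html_part(payload):
--     html = ''
--     start_here = False
--     for line in payload.splitlines():
--
--         if line.startswith("<html"):
--             start_here = True
--         if start_here:
--             html += line
--     if start_here == False:
--         return
--     else:
--         return html
-- ===== SOURCE B (Python) =====
-- def get_html_part(payload):
--     lines = payload.splitlines()
--     for i, line in enumerate(lines):
--         if line.startswith("<html"):
--             return ''.join(lines[i:])
--     return
-- ===== Notes on version B (the rewrite author's own statement) =====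
-- stated objective: simpler
-- what changed: Replaces A's boolean flag with incremental string accumulation over every line by locating the index of the first line that starts the html portion and joining the suffix of the line list once.
import Mathlib
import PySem

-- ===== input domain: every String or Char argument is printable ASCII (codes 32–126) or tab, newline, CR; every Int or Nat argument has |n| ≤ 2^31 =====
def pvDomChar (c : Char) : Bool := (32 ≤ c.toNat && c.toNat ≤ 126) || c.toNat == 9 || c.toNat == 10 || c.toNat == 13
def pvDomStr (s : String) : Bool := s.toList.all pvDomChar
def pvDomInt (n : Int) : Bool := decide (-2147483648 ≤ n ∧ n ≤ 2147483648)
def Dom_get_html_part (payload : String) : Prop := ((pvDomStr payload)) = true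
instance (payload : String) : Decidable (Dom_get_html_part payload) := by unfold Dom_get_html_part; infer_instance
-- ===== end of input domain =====

-- B locates the first line starting with "<html" and joins the line-list suffix once,
-- replacing A's boolean flag + incremental accumulation (objective: simpler).


-- ===== PORT A =====
-- one step of A's loop body: flag update first, then conditional append (html += line)
def pvStepA (acc : List Char × Bool) (line : List Char) : List Char × Bool :=
  let start := if PySem.Chars.startswith line ['<','h','t','m','l'] then true else acc.2
  ((if start then acc.1 ++ line else acc.1), start)

def get_html_part (payload : String) : Option String :=
  let st := ((PySem.Str.splitlines payload).map String.toList).foldl pvStepA ([], false)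
  if st.2 = false then none else some (String.mk st.1)

-- ===== PORT B =====
-- B's enumerate loop with early return: scan for the first line starting with "<html",
-- return ''.join of the suffix of the line list from there
def pvScanB : List (List Char) → Option String
  | [] => none
  | l :: rest =>
      if PySem.Chars.startswith l ['<','h','t','m','l'] then
        some (String.mk (PySem.Chars.join [] (l :: rest)))
      else pvScanB rest

def get_html_part_alt (payload : String) : Option String :=
  pvScanB ((PySem.Str.splitlines payload).map String.toList)

-- ===== PRECONDITION & SPEC =====
def Spec_get_html_part (payload : String) (out : Option String) : Prop := out = get_html_part_alt payload
instance (payload : String) (out : Option String) : Decidable (Spec_get_html_part payload out) := by unfold Spec_get_html_part; infer_instance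

-- ===== CLAIM (what is proved, stated in full; the proofs are below) =====
def Claim_equal_get_html_part : Prop := ∀ (payload : String), Dom_get_html_part payload → Spec_get_html_part payload (get_html_part payload)

-- ===== LEMMAS AND PROOFS =====
lemma pv_join_nil_flatten (ls : List (List Char)) : PySem.Chars.join [] ls = ls.flatten := by
  induction ls with
  | nil => simp [PySem.Chars.join_nil]
  | cons h t ih =>
      cases t with
      | nil => simp [PySem.Chars.join_singleton]
      | cons p q => simp [PySem.Chars.join_cons_cons] at *; simpa using ih

-- once the flag is true, A appends every remaining line and the flag stays true
lemma pv_foldA_true (ls : List (List Char)) (acc : List Char) :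
    ls.foldl pvStepA (acc, true) = (acc ++ ls.flatten, true) := by
  induction ls generalizing acc with
  | nil => simp
  | cons h t ih => simp [pvStepA, ih]

-- with the flag false, A's fold computes B's scan (the accumulator is untouched until a match)
lemma pv_foldA_false (ls : List (List Char)) :
    (if (ls.foldl pvStepA ([], false)).2 = false then none
     else some (String.mk (ls.foldl pvStepA ([], false)).1)) = pvScanB ls := by
  induction ls with
  | nil => simp [pvScanB]
  | cons h t ih =>
      by_cases hs : PySem.Chars.startswith h ['<','h','t','m','l']
      · simp [pvScanB, hs, pvStepA, pv_foldA_true, pv_join_nil_flatten]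
      · simpa [pvScanB, hs, pvStepA] using ih

-- ===== VERDICT (by name: the statement is the Claim_ definition above) =====
theorem get_html_part_spec : Claim_equal_get_html_part := by
  intro payload _
  unfold Spec_get_html_part get_html_part get_html_part_alt
  exact pv_foldA_false _
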